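-- pv_equiv track=rewrite | github.com/kodmig90/PythonLearning | task_1_2.py | sum_list_1
-- ===== SOURCE A (Python) =====
-- def sum_list_1(dataset: list) -> int:
--     # Вычисляет сумму чисел списка dataset, сумма цифр которых делится нацело на 7
--     sum_list_1 = 0
--     for n in dataset:
--         sum_list_a = 0
--         t = n
--         while t != 0:
--             sum_list_a += t % 10
--             t //= 10
--         if sum_list_a % 7 == 0:
--             sum_list_1 += n
--     return sum_list_1
-- ===== SOURCE B (Python) =====
-- def sum_list_1(dataset: list) -> int:
--     # Sum of elements whose decimal-digit sum is divisible by 7 (string-based digit sum).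
--     return sum(n for n in dataset if sum(int(c) for c in str(n)) % 7 == 0)
-- ===== Notes on version B (the rewrite author's own statement) =====
-- stated objective: idiomatic
-- what changed: The inner while-loop that extracts digits with %10 and //=10 into a running accumulator is replaced by a string-based digit sum (sum(int(c) for c in str(n))) inside a single sum-over-generator expression, removing both explicit loops and the outer accumulator.
import Mathlib
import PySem

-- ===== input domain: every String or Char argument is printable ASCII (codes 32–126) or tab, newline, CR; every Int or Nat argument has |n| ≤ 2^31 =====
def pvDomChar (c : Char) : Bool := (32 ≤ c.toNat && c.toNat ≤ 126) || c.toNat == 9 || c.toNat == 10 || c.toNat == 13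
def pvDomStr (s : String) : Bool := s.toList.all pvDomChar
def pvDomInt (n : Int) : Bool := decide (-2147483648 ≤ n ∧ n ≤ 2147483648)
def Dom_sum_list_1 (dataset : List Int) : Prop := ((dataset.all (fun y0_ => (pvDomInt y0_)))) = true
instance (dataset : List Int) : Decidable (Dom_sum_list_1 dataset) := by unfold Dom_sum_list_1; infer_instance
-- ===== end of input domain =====

-- B replaces A's arithmetic digit-extraction while-loop with a string-based digit sum
-- inside a single sum-over-generator expression (objective: idiomatic).


-- ===== PORT A =====
-- A's inner 'while t != 0' loop; the 't < 0' branch is a totality guard only: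
-- Python's loop never terminates for negative t (excluded by Pre_sum_list_1).
def pyDigitSum (t acc : Int) : Int :=
  if t = 0 then acc
  else if t < 0 then acc
  else pyDigitSum (PySem.Int.floordiv t 10) (acc + PySem.Int.mod t 10)
termination_by t.toNat
decreasing_by
  rename_i h0 hneg
  have h : (0:Int) < 10 := by omega
  rw [PySem.Int.floordiv_eq_ediv_of_pos h]
  omega

def sum_list_1 (dataset : List Int) : Int :=
  dataset.foldl (fun s n =>
    let sum_list_a := pyDigitSum n 0
    if PySem.Int.mod sum_list_a 7 = 0 then s + n else s) 0

-- ===== PORT B =====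
-- int(c) for the single digit character c of str(n) is its value c.toNat - 48 (exact on digits).
def altDigitSum (n : Int) : Int :=
  ((PySem.Int.toStr n).toList.map (fun c => (Int.ofNat (c.toNat - 48)))).sum

def sum_list_1_alt (dataset : List Int) : Int :=
  (dataset.filter (fun n => PySem.Int.mod (altDigitSum n) 7 == 0)).sum

-- ===== PRECONDITION & SPEC =====
-- Pre_ excludes lists containing a negative element: on those A's inner while-loop
-- never terminates (t cycles at -1 since t //= 10 floors), so A returns nothing there.
def Pre_sum_list_1 (dataset : List Int) : Prop := ∀ n ∈ dataset, 0 ≤ n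
instance (dataset : List Int) : Decidable (Pre_sum_list_1 dataset) := by unfold Pre_sum_list_1; infer_instance
def pvWitness_sum_list_1 : List Int := [7, 12, 59, 0, 70]

def Spec_sum_list_1 (dataset : List Int) (out : Int) : Prop := out = sum_list_1_alt dataset
instance (dataset : List Int) (out : Int) : Decidable (Spec_sum_list_1 dataset out) := by unfold Spec_sum_list_1; infer_instance

-- ===== CLAIM (what is proved, stated in full; the proofs are below) =====
def Claim_equal_sum_list_1 : Prop := ∀ (dataset : List Int), Dom_sum_list_1 dataset → Pre_sum_list_1 dataset → Spec_sum_list_1 dataset (sum_list_1 dataset)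

-- ===== LEMMAS AND PROOFS =====

-- mathematical digit sum of a natural number
def natDS (n : Nat) : Nat :=
  if h : n = 0 then 0 else n % 10 + natDS (n / 10)
decreasing_by exact Nat.div_lt_self (Nat.pos_of_ne_zero h) (by omega)

theorem digitVal_digitChar (d : Nat) (h : d < 10) :
    (Nat.digitChar d).toNat - 48 = d := by
  interval_cases d <;> rfl

theorem tdc_sum (f : Nat) : ∀ (n : Nat) (l : List Char), n < f →
    ((Nat.toDigitsCore 10 f n l).map (fun c => c.toNat - 48)).sum
      = natDS n + (l.map (fun c => c.toNat - 48)).sum := by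
  induction f with
  | zero => intro n l h; omega
  | succ f ih =>
    intro n l h
    rw [Nat.toDigitsCore]
    by_cases h10 : n / 10 = 0
    · have hn : n < 10 := by omega
      simp only [h10, if_true, List.map_cons, List.sum_cons]
      rw [digitVal_digitChar (n % 10) (Nat.mod_lt _ (by omega))]
      unfold natDS
      by_cases h0 : n = 0
      · simp [h0]
      · simp only [h0, dite_false, h10]
        rw [natDS]; simp
    · simp only [h10, if_false]
      have hne : n ≠ 0 := by omega
      have hlt : n / 10 < f := by
        have := Nat.div_lt_self (Nat.pos_of_ne_zero hne) (show 1 < 10 by omega)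
        omega
      rw [ih (n / 10) _ hlt]
      simp only [List.map_cons, List.sum_cons]
      rw [digitVal_digitChar (n % 10) (Nat.mod_lt _ (by omega))]
      conv_rhs => rw [natDS]
      simp only [hne, dite_false]
      omega

theorem cast_sum (l : List Char) :
    (l.map (fun c => (Int.ofNat (c.toNat - 48)))).sum
      = (((l.map (fun c => c.toNat - 48)).sum : Nat) : Int) := by
  induction l with
  | nil => simp
  | cons x xs ihx => simp only [List.map_cons, List.sum_cons, Nat.cast_add, ihx]; rfl

theorem altDigitSum_eq (n : Int) (h : 0 ≤ n) : altDigitSum n = (natDS n.toNat : Int) := by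
  unfold altDigitSum
  rw [PySem.Int.toList_toStr]
  unfold PySem.Int.toChars
  rw [if_neg (by omega)]
  unfold Nat.toDigits
  have := tdc_sum (n.toNat + 1) n.toNat [] (by omega)
  simp only [List.map_nil, List.sum_nil, Nat.add_zero] at this
  rw [cast_sum, this]

theorem pyDigitSum_eq (m : Nat) : ∀ acc : Int, pyDigitSum (m : Int) acc = acc + (natDS m : Int) := by
  induction m using Nat.strong_induction_on with
  | _ m ih =>
    intro acc
    rw [pyDigitSum]
    by_cases h0 : m = 0
    · subst h0; simp [natDS]
    · rw [if_neg (by omega), if_neg (by omega)]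
      rw [show PySem.Int.floordiv (m : Int) 10 = ((m / 10 : Nat) : Int) from
            PySem.Int.floordiv_natCast m 10,
          show PySem.Int.mod (m : Int) 10 = ((m % 10 : Nat) : Int) from
            PySem.Int.mod_natCast m 10]
      rw [ih (m / 10) (Nat.div_lt_self (Nat.pos_of_ne_zero h0) (by omega))]
      conv_rhs => rw [natDS]
      simp only [h0, dite_false]
      push_cast
      ring

theorem loop_eq (l : List Int) : ∀ s : Int, (∀ n ∈ l, 0 ≤ n) →
    l.foldl (fun s n =>
      let sum_list_a := pyDigitSum n 0
      if PySem.Int.mod sum_list_a 7 = 0 then s + n else s) s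
    = s + (l.filter (fun n => PySem.Int.mod (altDigitSum n) 7 == 0)).sum := by
  induction l with
  | nil => intro s _; simp
  | cons x xs ih =>
    intro s hpre
    have hx : 0 ≤ x := hpre x (by simp)
    have hds : pyDigitSum x 0 = altDigitSum x := by
      have hpd := pyDigitSum_eq x.toNat 0
      rw [Int.toNat_of_nonneg hx] at hpd
      rw [hpd, altDigitSum_eq x hx, zero_add]
    rw [List.foldl_cons, List.filter_cons,
        ih _ (fun n hn => hpre n (List.mem_cons_of_mem _ hn))]
    by_cases hc : (7:Int) ∣ altDigitSum x
    · simp [hds, PySem.Int.mod_eq_zero_iff_dvd, hc, add_assoc]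
    · simp [hds, PySem.Int.mod_eq_zero_iff_dvd, hc]

-- ===== VERDICT (by name: the statement is the Claim_ definition above) =====
theorem sum_list_1_spec : Claim_equal_sum_list_1 := by
  intro dataset _ hpre
  show sum_list_1 dataset = sum_list_1_alt dataset
  exact (loop_eq dataset 0 hpre).trans (zero_add _)
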